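-- pv_equiv track=rewrite | github.com/iangallagherm/plane_probabilities | finite-fields/fp.py | count_planes
-- ===== SOURCE A (Python) =====
-- def get_squares_table(prime):
--     is_square = [False]*prime
--
--     for n in range(prime):
--         is_square[(n*n) % prime] = True
--
--     return is_square
--
-- def count_planes(prime):
--     squares = get_squares_table(prime)
--
--     field_count = 0
--     split_count = 0
--     nilpotent_count = -1 # Negative 1 offsets the 1 counted for point (0,0,0,0)
--                          # which does not generate a nilpotent plane.
--
--     for x in range(prime):
--         for y in range(prime):
--             for z in range(prime):
--                 norm = -x*x - y*y + z*z
--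
--                 if ((norm % prime) == 0):
--                     nilpotent_count += 1
--                 elif (squares[-norm % prime]):
--                     split_count += 1
--                 else:
--                     field_count += 1
--
--     # Accounting for multiple counts of the each plane
--     field_count //= prime - 1
--     split_count //= prime - 1
--     nilpotent_count //= prime - 1
--
--     return [field_count, split_count, nilpotent_count]
-- ===== SOURCE B (Python) =====
-- def count_planes(prime):
--     # Memoize the inner z-loop: the classification of a triple (x,y,z) depends
--     # only on s = (x*x + y*y) % prime, so precompute per-residue contributions
--     # once (O(p^2)) and replace the triple loop with a double loop.
--     is_square = [False] * prime
--     for n in range(prime):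
--         is_square[(n * n) % prime] = True
--
--     contrib = []
--     for s in range(prime):
--         f = sp = nl = 0
--         for z in range(prime):
--             norm = z * z - s
--             if norm % prime == 0:
--                 nl += 1
--             elif is_square[-norm % prime]:
--                 sp += 1
--             else:
--                 f += 1
--         contrib.append((f, sp, nl))
--
--     field_count = 0
--     split_count = 0
--     nilpotent_count = -1
--     for x in range(prime):
--         for y in range(prime):
--             f, sp, nl = contrib[(x * x + y * y) % prime]
--             field_count += f
--             split_count += sp
--             nilpotent_count += nl
--
--     return [field_count // (prime - 1),
--             split_count // (prime - 1),
--             nilpotent_count // (prime - 1)]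
-- ===== Notes on version B (the rewrite author's own statement) =====
-- stated objective: faster
-- what changed: B precomputes, for each residue s, the classification counts of z*z - s over all z (one O(p^2) table) and replaces A's triple (x,y,z) loop by a double (x,y) loop that looks up the table at (x*x+y*y) % prime.
-- outside the precondition, e.g. on count_planes(1): A raises ZeroDivisionError, B raises ZeroDivisionError
import Mathlib
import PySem

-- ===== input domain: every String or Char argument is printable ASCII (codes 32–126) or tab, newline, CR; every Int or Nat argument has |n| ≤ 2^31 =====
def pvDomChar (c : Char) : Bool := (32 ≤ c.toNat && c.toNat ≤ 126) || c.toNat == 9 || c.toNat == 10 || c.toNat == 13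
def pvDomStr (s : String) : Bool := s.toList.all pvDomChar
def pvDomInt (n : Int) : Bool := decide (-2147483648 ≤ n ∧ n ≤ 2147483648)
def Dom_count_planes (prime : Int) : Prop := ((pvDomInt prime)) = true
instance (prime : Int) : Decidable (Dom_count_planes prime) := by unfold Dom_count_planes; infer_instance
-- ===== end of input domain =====

-- B memoizes A's inner z-loop per residue s = (x²+y²) % prime (a precomputed
-- contribution table), replacing the O(p³) triple loop by two O(p²) passes.


-- ===== PORT A =====
def get_squares_table (prime : Int) : List Bool :=
  (PySem.List.pyRange 0 prime 1).foldl
    (fun tbl n => tbl.set (PySem.Int.mod (n * n) prime).toNat true)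
    (List.replicate prime.toNat false)

def count_planes (prime : Int) : List Int :=
  let squares := get_squares_table prime
  let st :=
    (PySem.List.pyRange 0 prime 1).foldl (fun st x =>
      (PySem.List.pyRange 0 prime 1).foldl (fun st y =>
        (PySem.List.pyRange 0 prime 1).foldl (fun st z =>
          let norm := -x * x - y * y + z * z
          if PySem.Int.mod norm prime = 0 then (st.1, st.2.1, st.2.2 + 1)
          else if PySem.List.pyGetD squares (PySem.Int.mod (-norm) prime) false then
            (st.1, st.2.1 + 1, st.2.2)
          else (st.1 + 1, st.2.1, st.2.2)) st) st)
      ((0 : Int), (0 : Int), (-1 : Int))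
  [PySem.Int.floordiv st.1 (prime - 1),
   PySem.Int.floordiv st.2.1 (prime - 1),
   PySem.Int.floordiv st.2.2 (prime - 1)]

-- ===== PORT B =====
-- Source B builds the same is_square table inline (same lines as A's helper).
def pvSquaresB (prime : Int) : List Bool :=
  (PySem.List.pyRange 0 prime 1).foldl
    (fun tbl n => tbl.set (PySem.Int.mod (n * n) prime).toNat true)
    (List.replicate prime.toNat false)

-- the inner z-loop of Source B, classifying z*z - s, run once per residue s
def pvContribAt (prime : Int) (squares : List Bool) (s : Int) : Int × Int × Int :=
  (PySem.List.pyRange 0 prime 1).foldl (fun c z =>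
    let norm := z * z - s
    if PySem.Int.mod norm prime = 0 then (c.1, c.2.1, c.2.2 + 1)
    else if PySem.List.pyGetD squares (PySem.Int.mod (-norm) prime) false then
      (c.1, c.2.1 + 1, c.2.2)
    else (c.1 + 1, c.2.1, c.2.2)) ((0 : Int), (0 : Int), (0 : Int))

def count_planes_alt (prime : Int) : List Int :=
  let squares := pvSquaresB prime
  let contrib :=
    (PySem.List.pyRange 0 prime 1).foldl
      (fun acc s => acc ++ [pvContribAt prime squares s]) []
  let st :=
    (PySem.List.pyRange 0 prime 1).foldl (fun st x =>
      (PySem.List.pyRange 0 prime 1).foldl (fun st y =>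
        let t := PySem.List.pyGetD contrib
          (PySem.Int.mod (x * x + y * y) prime) ((0 : Int), (0 : Int), (0 : Int))
        (st.1 + t.1, st.2.1 + t.2.1, st.2.2 + t.2.2)) st)
      ((0 : Int), (0 : Int), (-1 : Int))
  [PySem.Int.floordiv st.1 (prime - 1),
   PySem.Int.floordiv st.2.1 (prime - 1),
   PySem.Int.floordiv st.2.2 (prime - 1)]

-- ===== PRECONDITION & SPEC =====
-- Pre_ excludes only prime = 1, where both Pythons raise ZeroDivisionError
-- in the final '//= prime - 1'.
def Pre_count_planes (prime : Int) : Prop := prime ≠ 1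
instance (prime : Int) : Decidable (Pre_count_planes prime) := by
  unfold Pre_count_planes; infer_instance
def pvWitness_count_planes : Int := 5

def Spec_count_planes (prime : Int) (out : List Int) : Prop := out = count_planes_alt prime
instance (prime : Int) (out : List Int) : Decidable (Spec_count_planes prime out) := by
  unfold Spec_count_planes; infer_instance

-- ===== CLAIM (what is proved, stated in full; the proofs are below) =====
def Claim_equal_count_planes : Prop :=
  ∀ (prime : Int), Dom_count_planes prime → Pre_count_planes prime →
    Spec_count_planes prime (count_planes prime)

-- ===== LEMMAS AND PROOFS =====

-- componentwise addition on the counter triple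
def pvAdd3 (a b : Int × Int × Int) : Int × Int × Int :=
  (a.1 + b.1, a.2.1 + b.2.1, a.2.2 + b.2.2)

lemma pvAdd3_assoc (a b c : Int × Int × Int) :
    pvAdd3 (pvAdd3 a b) c = pvAdd3 a (pvAdd3 b c) := by
  simp [pvAdd3]; omega

-- a fold whose step adds an increment independent of the state factors through (0,0,0)
lemma pvFoldl_add3 (g : Int × Int × Int → Int → Int × Int × Int)
    (hg : ∀ st z, g st z = pvAdd3 st (g (0, 0, 0) z)) :
    ∀ (l : List Int) (st : Int × Int × Int),
      l.foldl g st = pvAdd3 st (l.foldl g (0, 0, 0)) := by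
  intro l
  induction l with
  | nil => intro st; simp [pvAdd3]
  | cons z l ih =>
      intro st
      simp only [List.foldl_cons]
      rw [ih (g st z), ih (g (0, 0, 0) z), hg st z, pvAdd3_assoc]

-- the classifying step adds a state-independent increment
lemma pvStep_add3 (prime : Int) (squares : List Bool) (f : Int → Int)
    (st : Int × Int × Int) (z : Int) :
    (if PySem.Int.mod (f z) prime = 0 then (st.1, st.2.1, st.2.2 + 1)
     else if PySem.List.pyGetD squares (PySem.Int.mod (-(f z)) prime) false then
       (st.1, st.2.1 + 1, st.2.2)
     else (st.1 + 1, st.2.1, st.2.2)) =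
    pvAdd3 st
      (if PySem.Int.mod (f z) prime = 0 then ((0 : Int), (0 : Int), (0 : Int) + 1)
       else if PySem.List.pyGetD squares (PySem.Int.mod (-(f z)) prime) false then
         ((0 : Int), (0 : Int) + 1, (0 : Int))
       else ((0 : Int) + 1, (0 : Int), (0 : Int))) := by
  split_ifs <;> simp [pvAdd3]

-- classification depends on the norm only through its residue mod prime
lemma pvMod_congr (prime a b : Int) (hp : 0 < prime) (h : a % prime = b % prime) :
    PySem.Int.mod a prime = PySem.Int.mod b prime ∧
    PySem.Int.mod (-a) prime = PySem.Int.mod (-b) prime := by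
  rw [PySem.Int.mod_eq_emod_of_pos hp, PySem.Int.mod_eq_emod_of_pos hp,
      PySem.Int.mod_eq_emod_of_pos hp, PySem.Int.mod_eq_emod_of_pos hp]
  refine ⟨h, ?_⟩
  have ha : -a = 0 - a := by ring
  have hb : -b = 0 - b := by ring
  rw [ha, hb, Int.sub_emod, Int.sub_emod 0 b, h]

-- two folds over the same list with pointwise-equal steps agree
lemma pvFoldl_ext {α β : Type} (f g : β → α → β)
    (h : ∀ st z, f st z = g st z) (l : List α) (st : β) :
    l.foldl f st = l.foldl g st := by
  have hfg : f = g := funext fun st => funext fun z => h st z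
  rw [hfg]

-- A's inner z-loop equals B's per-residue contribution at s = (x²+y²) % prime
lemma pvInner_eq (prime : Int) (hp : 0 < prime) (squares : List Bool)
    (x y : Int) (st : Int × Int × Int) :
    (PySem.List.pyRange 0 prime 1).foldl (fun st z =>
      let norm := -x * x - y * y + z * z
      if PySem.Int.mod norm prime = 0 then (st.1, st.2.1, st.2.2 + 1)
      else if PySem.List.pyGetD squares (PySem.Int.mod (-norm) prime) false then
        (st.1, st.2.1 + 1, st.2.2)
      else (st.1 + 1, st.2.1, st.2.2)) st =
    pvAdd3 st (pvContribAt prime squares (PySem.Int.mod (x * x + y * y) prime)) := by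
  have hcongr : ∀ z : Int,
      PySem.Int.mod (-x * x - y * y + z * z) prime =
        PySem.Int.mod (z * z - PySem.Int.mod (x * x + y * y) prime) prime ∧
      PySem.Int.mod (-(-x * x - y * y + z * z)) prime =
        PySem.Int.mod (-(z * z - PySem.Int.mod (x * x + y * y) prime)) prime := by
    intro z
    apply pvMod_congr _ _ _ hp
    rw [PySem.Int.mod_eq_emod_of_pos hp]
    have h1 : -x * x - y * y + z * z = z * z - (x * x + y * y) := by ring
    rw [h1, Int.sub_emod, Int.sub_emod (z * z) ((x * x + y * y) % prime),
        Int.emod_emod_of_dvd _ dvd_rfl]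
  have hsame : (PySem.List.pyRange 0 prime 1).foldl (fun st z =>
      let norm := -x * x - y * y + z * z
      if PySem.Int.mod norm prime = 0 then (st.1, st.2.1, st.2.2 + 1)
      else if PySem.List.pyGetD squares (PySem.Int.mod (-norm) prime) false then
        (st.1, st.2.1 + 1, st.2.2)
      else (st.1 + 1, st.2.1, st.2.2)) st =
    (PySem.List.pyRange 0 prime 1).foldl (fun st z =>
      let norm := z * z - PySem.Int.mod (x * x + y * y) prime
      if PySem.Int.mod norm prime = 0 then (st.1, st.2.1, st.2.2 + 1)
      else if PySem.List.pyGetD squares (PySem.Int.mod (-norm) prime) false then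
        (st.1, st.2.1 + 1, st.2.2)
      else (st.1 + 1, st.2.1, st.2.2)) st := by
    apply pvFoldl_ext
    intro st z
    simp only [(hcongr z).1, (hcongr z).2]
  rw [hsame]
  unfold pvContribAt
  exact pvFoldl_add3 _
    (fun st z => pvStep_add3 prime squares
      (fun z => z * z - PySem.Int.mod (x * x + y * y) prime) st z) _ st

-- the contrib table is the map of pvContribAt over the range
lemma pvContrib_lookup (prime : Int) (hp : 0 < prime) (squares : List Bool) (x y : Int) :
    PySem.List.pyGetD
      ((PySem.List.pyRange 0 prime 1).foldl
        (fun acc s => acc ++ [pvContribAt prime squares s]) [])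
      (PySem.Int.mod (x * x + y * y) prime) ((0 : Int), (0 : Int), (0 : Int)) =
    pvContribAt prime squares (PySem.Int.mod (x * x + y * y) prime) := by
  rw [PySem.List.foldl_append_singleton_eq_map, List.nil_append]
  set s := PySem.Int.mod (x * x + y * y) prime with hs
  have h0 : 0 ≤ s := PySem.Int.mod_nonneg _ hp
  have hlt : s < prime := PySem.Int.mod_lt _ hp
  have hprime : prime = (prime.toNat : Int) := by omega
  have hsn : s = (s.toNat : Int) := by omega
  rw [hprime, hsn]
  exact PySem.List.pyGetD_map_pyRange _ _ _ _ (by omega)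

-- ===== VERDICT (by name: the statement is the Claim_ definition above) =====
theorem count_planes_spec : Claim_equal_count_planes := by
  intro prime _ _
  unfold Spec_count_planes count_planes count_planes_alt get_squares_table pvSquaresB
  by_cases hp : 0 < prime
  · simp only []
    set SQ : List Bool :=
      List.foldl (fun tbl n => tbl.set (PySem.Int.mod (n * n) prime).toNat true)
        (List.replicate prime.toNat false) (PySem.List.pyRange 0 prime 1) with hSQ
    set CT : List (Int × Int × Int) :=
      List.foldl (fun acc s => acc ++ [pvContribAt prime SQ s]) []
        (PySem.List.pyRange 0 prime 1) with hCT
    have hst :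
        (PySem.List.pyRange 0 prime 1).foldl (fun (st : Int × Int × Int) (x : Int) =>
          (PySem.List.pyRange 0 prime 1).foldl (fun st y =>
            (PySem.List.pyRange 0 prime 1).foldl (fun st z =>
              if PySem.Int.mod (-x * x - y * y + z * z) prime = 0 then
                (st.1, st.2.1, st.2.2 + 1)
              else if PySem.List.pyGetD SQ
                  (PySem.Int.mod (-(-x * x - y * y + z * z)) prime) false then
                (st.1, st.2.1 + 1, st.2.2)
              else (st.1 + 1, st.2.1, st.2.2)) st) st)
          ((0 : Int), (0 : Int), (-1 : Int)) =
        (PySem.List.pyRange 0 prime 1).foldl (fun (st : Int × Int × Int) (x : Int) =>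
          (PySem.List.pyRange 0 prime 1).foldl (fun st y =>
            (st.1 + (PySem.List.pyGetD CT (PySem.Int.mod (x * x + y * y) prime)
                ((0 : Int), (0 : Int), (0 : Int))).1,
             st.2.1 + (PySem.List.pyGetD CT (PySem.Int.mod (x * x + y * y) prime)
                ((0 : Int), (0 : Int), (0 : Int))).2.1,
             st.2.2 + (PySem.List.pyGetD CT (PySem.Int.mod (x * x + y * y) prime)
                ((0 : Int), (0 : Int), (0 : Int))).2.2)) st)
          ((0 : Int), (0 : Int), (-1 : Int)) := by
      apply pvFoldl_ext
      intro st x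
      apply pvFoldl_ext
      intro st' y
      rw [pvInner_eq prime hp SQ x y st', hCT,
          pvContrib_lookup prime hp SQ x y]
      simp [pvAdd3]
    rw [hst]
  · rw [PySem.List.pyRange_one_eq_nil (by omega)]
    simp
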